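-- pv_equiv track=rewrite | github.com/myrzh/gradebook_sandbox | main.py | verify_cell
-- ===== SOURCE A (Python) =====
-- def verify_cell(cell_data: str):
--     allowed_symbols = '0123456789.*'
--
--     for symb in cell_data:
--         if symb not in allowed_symbols:
--             return False
--
--     if '*' not in cell_data:
--         try:
--             int(cell_data)
--         except ValueError:
--             return False
--     elif '*' in cell_data:
--         astro_index = cell_data.find('*')
--         before_astro = cell_data[:astro_index]
--         after_astro = cell_data[astro_index + 1:]
--         if after_astro.startswith('.'):
--             return False
--         try:
--             int(before_astro)
--             float(after_astro)
--         except ValueError: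
--             return False
--
--     return True
-- ===== SOURCE B (Python) =====
-- def verify_cell(cell_data: str):
--     head, star, tail = cell_data.partition('*')
--     if not head.isdigit():
--         return False
--     if not star:
--         return True
--     whole, dot, frac = tail.partition('.')
--     if not whole.isdigit():
--         return False
--     return frac == '' or frac.isdigit()
-- ===== Notes on version B (the rewrite author's own statement) =====
-- stated objective: simpler
-- what changed: Replaces A's character-whitelist scan plus try/except int()/float() parsing with two str.partition splits ('*' then '.') validated by plain isdigit tests.
import Mathlib
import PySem

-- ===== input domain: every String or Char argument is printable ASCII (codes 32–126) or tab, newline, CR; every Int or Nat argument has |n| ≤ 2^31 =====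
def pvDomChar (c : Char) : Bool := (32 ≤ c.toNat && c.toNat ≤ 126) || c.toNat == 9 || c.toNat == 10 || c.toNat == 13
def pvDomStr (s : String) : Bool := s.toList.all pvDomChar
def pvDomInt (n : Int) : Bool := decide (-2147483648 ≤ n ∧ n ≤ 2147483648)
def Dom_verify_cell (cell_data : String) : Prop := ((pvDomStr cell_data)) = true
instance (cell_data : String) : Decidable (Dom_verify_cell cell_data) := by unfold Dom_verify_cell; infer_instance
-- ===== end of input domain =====

-- B replaces A's character scan plus try/except int()/float() parsing with two str.partition
-- splits and isdigit tests (objective: simpler).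

-- ===== PORT A =====
-- Acceptance of `int(s)` for A's value-discarded `try: int(s)`. Exact for strings whose
-- characters all lie in '0123456789.*' — the only strings that reach the call in A (the
-- character loop has already passed): on that alphabet int() accepts exactly the nonempty
-- all-digit strings (whitespace / sign / underscore, the other int() features, cannot occur).
def pyIntAccepts (s : List Char) : Bool := !s.isEmpty && s.all PySem.Chars.isdigit

-- Acceptance of `float(s)` (PySem has no float; only success/failure is used by A). Exact on
-- the same alphabet '0123456789.*': float() accepts exactly the digit/dot strings with at
-- least one digit and at most one dot; any '*' raises (inf/nan/exponent/sign cannot occur).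
def pyFloatAccepts (s : List Char) : Bool :=
  s.any PySem.Chars.isdigit && s.all (fun c => PySem.Chars.isdigit c || c == '.')
    && decide (s.count '.' ≤ 1)

def verify_cell (cell_data : String) : Bool :=
  let allowed_symbols := "0123456789.*"
  -- `for symb in cell_data: if symb not in allowed_symbols: return False` — an all-check
  if (cell_data.toList.all fun symb => PySem.Chars.isIn [symb] allowed_symbols.toList) = false then
    false
  else if PySem.Str.isIn "*" cell_data = false then
    pyIntAccepts cell_data.toList      -- try: int(cell_data) except ValueError: return False
  else
    let astro_index := PySem.Str.find cell_data "*"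
    let before_astro := PySem.List.slice cell_data.toList none (some astro_index)
    let after_astro := PySem.List.slice cell_data.toList (some (astro_index + 1)) none
    if PySem.Chars.startswith after_astro ['.'] then false
    else pyIntAccepts before_astro && pyFloatAccepts after_astro

-- ===== PORT B =====
-- str.partition(sep): exact for nonempty sep (here always a single character).
def pyPartition (s sep : List Char) : List Char × List Char × List Char :=
  let i := PySem.Chars.find s sep
  if i = -1 then (s, [], [])
  else (PySem.List.slice s none (some i), sep, PySem.List.slice s (some (i + (sep.length : Int))) none)

def verify_cell_alt (cell_data : String) : Bool :=
  let p := pyPartition cell_data.toList ['*']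
  if PySem.Chars.strIsdigit p.1 = false then false
  else if p.2.1.isEmpty then true
  else
    let q := pyPartition p.2.2 ['.']
    if PySem.Chars.strIsdigit q.1 = false then false
    else q.2.2.isEmpty || PySem.Chars.strIsdigit q.2.2

-- ===== PRECONDITION & SPEC =====
def Spec_verify_cell (cell_data : String) (out : Bool) : Prop := out = verify_cell_alt cell_data
instance (cell_data : String) (out : Bool) : Decidable (Spec_verify_cell cell_data out) := by unfold Spec_verify_cell; infer_instance

-- ===== CLAIM (what is proved, stated in full; the proofs are below) =====
def Claim_equal_verify_cell : Prop := ∀ (cell_data : String), Dom_verify_cell cell_data → Spec_verify_cell cell_data (verify_cell cell_data)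

-- ===== LEMMAS AND PROOFS =====

theorem digit_mem (c : Char) (h : PySem.Chars.isdigit c = true) : c ∈ "0123456789.*".toList := by
  simp [PySem.Chars.isdigit, Char.le_def] at h
  have h1 : 48 ≤ c.toNat := UInt32.le_iff_toNat_le.mp h.1
  have h2 : c.toNat ≤ 57 := UInt32.le_iff_toNat_le.mp h.2
  have hc : c = Char.ofNat c.toNat := (Char.ofNat_toNat c).symm
  interval_cases hn : c.toNat <;> simp_all

theorem isIn_single (c : Char) (s : List Char) :
    PySem.Chars.isIn [c] s = decide (c ∈ s) := by
  by_cases hm : c ∈ s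
  · simp [hm]
    rw [PySem.Chars.isIn_iff_infix, List.singleton_infix_iff]; exact hm
  · simp [hm]
    rw [← Bool.not_eq_true, PySem.Chars.isIn_iff_infix, List.singleton_infix_iff]; exact hm

theorem if_false_and (X Y : Bool) : (if X = false then false else Y) = (X && Y) := by
  cases X <;> simp

theorem if_true_and (X Y : Bool) : (if X = true then false else Y) = (!X && Y) := by
  cases X <;> simp

-- a successful find splits the list at the FIRST occurrence of the character
theorem find_decomp (l : List Char) (c : Char) (h : PySem.Chars.find l [c] ≠ -1) :
    ∃ u t, l = u ++ c :: t ∧ c ∉ u ∧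
      PySem.List.slice l none (some (PySem.Chars.find l [c])) = u ∧
      PySem.List.slice l (some (PySem.Chars.find l [c] + 1)) none = t := by
  have h0 : 0 ≤ PySem.Chars.find l [c] := by
    have := PySem.Chars.neg_one_le_find l [c]; omega
  obtain ⟨hpre, hmin⟩ := PySem.Chars.find_spec h0
  set f := PySem.Chars.find l [c] with hfdef
  set k := f.toNat with hk
  obtain ⟨t, ht⟩ : ∃ t, l.drop k = c :: t := by
    obtain ⟨s, hs⟩ := hpre
    exact ⟨s, by simp [← hs]⟩
  refine ⟨l.take k, t, ?_, ?_, ?_, ?_⟩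
  · conv_lhs => rw [← List.take_append_drop k l]
    rw [ht]
  · intro hc
    obtain ⟨j, hj, hjl⟩ := List.getElem_of_mem hc
    have hjk : j < k := lt_of_lt_of_le hj (by simp)
    refine hmin j hjk ⟨l.drop (j+1), ?_⟩
    have hjlen : j < l.length := lt_of_lt_of_le hj (by simp)
    rw [List.drop_eq_getElem_cons hjlen]
    simp [List.getElem_take] at hjl
    simp [hjl]
  · rw [PySem.List.slice_to _ h0]
  · rw [PySem.List.slice_from _ (by omega)]
    have h1 : (f + 1).toNat = k + 1 := by omega
    rw [h1, ← List.drop_drop, ht]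
    simp

-- A's gate on the float part (all chars allowed, no leading dot, float() accepts) equals
-- B's partition-at-'.' check — dot-free case
theorem floatPart1 (t : List Char) (hf : PySem.Chars.find t ['.'] = -1) :
    ((t.all fun c => decide (c ∈ "0123456789.*".toList)) &&
      (!PySem.Chars.startswith t ['.'] && pyFloatAccepts t))
    = (let q := pyPartition t ['.']
       if PySem.Chars.strIsdigit q.1 = false then false
       else q.2.2.isEmpty || PySem.Chars.strIsdigit q.2.2) := by
  have hdot : '.' ∉ t := by
    have := (PySem.Chars.find_eq_neg_one_iff t ['.']).mp hf
    rw [List.singleton_infix_iff] at this; exact this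
  have hsw : PySem.Chars.startswith t ['.'] = false := by
    rw [← Bool.not_eq_true, PySem.Chars.startswith_iff]
    intro hp; exact hdot (hp.subset (by simp))
  have hcount : t.count '.' = 0 := List.count_eq_zero.mpr hdot
  simp only [pyPartition, hf]
  rw [Bool.eq_iff_iff]
  simp [hsw, pyFloatAccepts, PySem.Chars.strIsdigit, hcount,
    List.all_eq_true, List.any_eq_true]
  constructor
  · rintro ⟨-, ⟨x, hx, -⟩, hdd⟩
    refine ⟨by rintro rfl; exact absurd hx (List.not_mem_nil), fun c hc => ?_⟩
    rcases hdd c hc with h | h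
    · exact h
    · exact absurd (h ▸ hc) hdot
  · rintro ⟨hne, hd⟩
    obtain ⟨x, hx⟩ := List.exists_mem_of_ne_nil t hne
    refine ⟨fun c hc => by simpa using digit_mem c (hd c hc), ⟨x, hx, hd x hx⟩,
      fun c hc => Or.inl (hd c hc)⟩

-- … and the case with a dot present
theorem floatPart2 (t : List Char) (hf : ¬ PySem.Chars.find t ['.'] = -1) :
    ((t.all fun c => decide (c ∈ "0123456789.*".toList)) &&
      (!PySem.Chars.startswith t ['.'] && pyFloatAccepts t))
    = (let q := pyPartition t ['.']
       if PySem.Chars.strIsdigit q.1 = false then false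
       else q.2.2.isEmpty || PySem.Chars.strIsdigit q.2.2) := by
  obtain ⟨w, x, hwt, hw, hs1, hs2⟩ := find_decomp t '.' hf
  simp only [pyPartition, if_neg hf, List.length_singleton, Nat.cast_one, hs1, hs2]
  subst hwt
  rcases w with _ | ⟨a, w'⟩
  · have hsw : PySem.Chars.startswith ('.' :: x) ['.'] = true := by
      rw [PySem.Chars.startswith_iff]; simp
    simp [hsw, PySem.Chars.strIsdigit]
  · have ha : a ≠ '.' := fun h => hw (h ▸ List.mem_cons_self)
    have ha' : ¬ a = '.' := ha
    have hsw : PySem.Chars.startswith (a :: (w' ++ '.' :: x)) ['.'] = false := by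
      rw [← Bool.not_eq_true, PySem.Chars.startswith_iff]
      intro hp
      obtain ⟨s, hs⟩ := hp
      simp at hs
      exact ha hs.1.symm
    have hw' : '.' ∉ w' := fun h => hw (List.mem_cons_of_mem _ h)
    have hdigdot : PySem.Chars.isdigit '.' = false := by decide
    have hcnt : List.count '.' (a :: (w' ++ '.' :: x)) = List.count '.' x + 1 := by
      have h1 : List.count '.' w' = 0 := List.count_eq_zero.mpr hw'
      simp only [List.count_cons, List.count_append, h1]
      simp [ha']
    rw [Bool.eq_iff_iff]
    simp [hsw, pyFloatAccepts, PySem.Chars.strIsdigit, hcnt, hdigdot,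
      List.all_eq_true, List.any_eq_true]
    have hdig_ne : ∀ c : Char, PySem.Chars.isdigit c = true → ¬ c = '.' := by
      intro c h he; rw [he] at h; simp [hdigdot] at h
    constructor
    · rintro ⟨-, ⟨-, hda, hwall, hxall⟩, hcx⟩
      have hxdot : '.' ∉ x := List.count_eq_zero.mp hcx
      refine ⟨⟨?_, fun c hc => ?_⟩, ?_⟩
      · rcases hda with h | h
        · exact h
        · exact absurd h ha
      · rcases hwall c hc with h | h
        · exact h
        · exact absurd (h ▸ hc) hw'
      · by_cases hx0 : x = []
        · exact Or.inl hx0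
        · refine Or.inr ⟨hx0, fun c hc => ?_⟩
          rcases hxall c hc with h | h
          · exact h
          · exact absurd (h ▸ hc) hxdot
    · rintro ⟨⟨hda, hwd⟩, hx⟩
      have hxd : ∀ c ∈ x, PySem.Chars.isdigit c = true := by
        rcases hx with h | ⟨-, h⟩
        · subst h; simp
        · exact h
      have hxcnt : List.count '.' x = 0 :=
        List.count_eq_zero.mpr (fun hm => hdig_ne '.' (hxd _ hm) rfl)
      refine ⟨⟨by simpa using digit_mem a hda,
        fun c hc => by simpa using digit_mem c (hwd c hc),
        fun c hc => by simpa using digit_mem c (hxd c hc)⟩,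
        ⟨Or.inl hda, Or.inl hda, fun c hc => Or.inl (hwd c hc),
          fun c hc => Or.inl (hxd c hc)⟩, hxcnt⟩

theorem strIsdigit_allowed (u : List Char) (h : PySem.Chars.strIsdigit u = true) :
    (u.all fun c => decide (c ∈ "0123456789.*".toList)) = true := by
  simp [PySem.Chars.strIsdigit] at h
  simp [List.all_eq_true]
  intro c hc
  simpa using digit_mem c (h.2 c hc)

theorem verify_cell_main (l : List Char) :
    (if (l.all fun symb => PySem.Chars.isIn [symb] "0123456789.*".toList) = false then
      false
    else if PySem.Chars.isIn ['*'] l = false then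
      pyIntAccepts l
    else
      let astro_index := PySem.Chars.find l ['*']
      let before_astro := PySem.List.slice l none (some astro_index)
      let after_astro := PySem.List.slice l (some (astro_index + 1)) none
      if PySem.Chars.startswith after_astro ['.'] then false
      else pyIntAccepts before_astro && pyFloatAccepts after_astro)
    =
    (let p := pyPartition l ['*']
    if PySem.Chars.strIsdigit p.1 = false then false
    else if p.2.1.isEmpty then true
    else
      let q := pyPartition p.2.2 ['.']
      if PySem.Chars.strIsdigit q.1 = false then false
      else q.2.2.isEmpty || PySem.Chars.strIsdigit q.2.2) := by
  have hall : (l.all fun symb => PySem.Chars.isIn [symb] "0123456789.*".toList)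
      = (l.all fun c => decide (c ∈ "0123456789.*".toList)) := by
    simp only [isIn_single]
  have hInt : ∀ u : List Char, pyIntAccepts u = PySem.Chars.strIsdigit u := fun _ => rfl
  by_cases hstar : PySem.Chars.find l ['*'] = -1
  · have hpart : pyPartition l ['*'] = (l, [], []) := by simp [pyPartition, hstar]
    have hisin : PySem.Chars.isIn ['*'] l = false := by
      simp [PySem.Chars.isIn, hstar]
    rw [hall, hpart]
    simp only [hisin, if_true, hInt, List.isEmpty_nil]
    cases hD : PySem.Chars.strIsdigit l
    · cases hA : (l.all fun c => decide (c ∈ "0123456789.*".toList)) <;> simp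
    · rw [strIsdigit_allowed l hD]
  · obtain ⟨u, t, hlut, hu, hs1, hs2⟩ := find_decomp l '*' hstar
    have hpart : pyPartition l ['*'] = (u, ['*'], t) := by
      simp [pyPartition, if_neg hstar, hs1, hs2]
    have hisin : PySem.Chars.isIn ['*'] l = true := by
      simp [PySem.Chars.isIn]
      omega
    rw [hall, hpart]
    simp only [hisin, Bool.true_eq_false, if_false, hs1, hs2, hInt, List.isEmpty_cons]
    cases hD : PySem.Chars.strIsdigit u
    · simp only [if_true]
      split_ifs <;> simp
    · simp only [Bool.true_eq_false, if_false]
      have hallt : (l.all fun c => decide (c ∈ "0123456789.*".toList)) =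
          (t.all fun c => decide (c ∈ "0123456789.*".toList)) := by
        have hstar_al : (decide ('*' ∈ "0123456789.*".toList)) = true := by decide
        rw [hlut, List.all_append, strIsdigit_allowed u hD, Bool.true_and,
          List.all_cons, hstar_al, Bool.true_and]
      rw [hallt, if_false_and, if_true_and, Bool.true_and]
      by_cases hft : PySem.Chars.find t ['.'] = -1
      · exact floatPart1 t hft
      · exact floatPart2 t hft

-- ===== VERDICT (by name: the statement is the Claim_ definition above) =====
theorem verify_cell_spec : Claim_equal_verify_cell := by
  intro s _
  unfold Spec_verify_cell verify_cell verify_cell_alt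
  simpa using verify_cell_main s.toList
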